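-- pv_equiv track=rewrite | github.com/FundationOne/backtesting | riskbands.py | generate_risk_band_scenarios
-- ===== SOURCE A (Python) =====
-- def generate_risk_band_scenarios(band_indices, max_length=7, total_combinations=100):
--     scenarios = []
--     queue = [[band_indices[0]]]  # Start from the first band index
--
--     while queue and len(scenarios) < total_combinations:
--         path = queue.pop(0)
--         scenarios.append(path)
--         if len(path) < max_length:
--             current = path[-1]
--             for next_band in [current + 1, current -1]:
--                 if 0 <= next_band < len(band_indices):
--                     new_path = path + [next_band]
--                     queue.append(new_path)
--
--     return scenarios[:total_combinations]
-- ===== SOURCE B (Python) =====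
-- def generate_risk_band_scenarios(band_indices, max_length=7, total_combinations=100):
--     scenarios = []
--     frontier = [[band_indices[0]]]  # current BFS level
--     while frontier and len(scenarios) < total_combinations:
--         next_frontier = []
--         for path in frontier:
--             scenarios.append(path)
--             if len(scenarios) >= total_combinations:
--                 break
--             if len(path) < max_length:
--                 current = path[-1]
--                 for nb in (current + 1, current - 1):
--                     if 0 <= nb < len(band_indices):
--                         next_frontier.append(path + [nb])
--         frontier = next_frontier
--     return scenarios[:total_combinations]
-- ===== Notes on version B (the rewrite author's own statement) =====
-- stated objective: alternative
-- what changed: Replaced the single flat FIFO-queue BFS loop (popping the queue's front, pushing children to its back) by explicit level-order generation: an outer loop over generations and an inner loop over the current frontier that appends each path to the result, breaking at the cap, while collecting the next generation's frontier.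
import Mathlib
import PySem

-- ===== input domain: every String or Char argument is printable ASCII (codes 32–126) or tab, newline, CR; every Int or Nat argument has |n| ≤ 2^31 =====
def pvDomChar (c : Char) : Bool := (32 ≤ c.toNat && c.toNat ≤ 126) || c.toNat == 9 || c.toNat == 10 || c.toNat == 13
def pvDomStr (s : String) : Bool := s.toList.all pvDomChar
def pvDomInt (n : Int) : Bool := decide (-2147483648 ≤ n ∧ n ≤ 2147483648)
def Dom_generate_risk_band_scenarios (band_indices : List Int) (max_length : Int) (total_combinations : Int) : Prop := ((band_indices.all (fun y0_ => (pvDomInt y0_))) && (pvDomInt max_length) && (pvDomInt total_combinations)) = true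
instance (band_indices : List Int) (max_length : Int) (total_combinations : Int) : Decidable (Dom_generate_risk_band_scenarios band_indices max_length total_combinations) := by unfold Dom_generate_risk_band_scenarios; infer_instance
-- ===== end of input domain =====

-- B replaces A's flat FIFO-queue BFS by explicit level-order generation (outer loop over
-- generations, inner loop over the current frontier); same BFS order and cutoff, different decomposition.


-- ===== PORT A =====
-- A's while loop: pop the queue's front, append it to scenarios, push its admissible
-- children (+1 then -1) to the queue's back; stop when the queue is empty or the cap is hit.
-- Each iteration requires scenarios.length < tc and appends one scenario, so the loop runs at
-- most tc.toNat times: fuel = (tc - scenarios.length).toNat is a pure totality guard (the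
-- fuel-0 branch returns scenarios exactly like the failing guard, and is never reached while
-- the invariant fuel = (tc - scenarios.length).toNat holds).
-- The path's last element: every path in the queue is nonempty, so getLast?.getD 0 is exact
-- (Python would raise on an empty path, which never occurs).
def pvLoopA (bi : List Int) (ml tc : Int) (fuel : Nat) (queue scenarios : List (List Int)) :
    List (List Int) :=
  match queue with
  | [] => scenarios
  | path :: rest =>
    if (scenarios.length : Int) < tc then
      match fuel with
      | 0 => scenarios   -- unreachable under the fuel invariant
      | fuel' + 1 =>
        let scenarios' := scenarios ++ [path]
        if (path.length : Int) < ml then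
          let current := path.getLast?.getD 0
          let q1 := if 0 ≤ current + 1 ∧ current + 1 < (bi.length : Int) then
                      rest ++ [path ++ [current + 1]] else rest
          let q2 := if 0 ≤ current - 1 ∧ current - 1 < (bi.length : Int) then
                      q1 ++ [path ++ [current - 1]] else q1
          pvLoopA bi ml tc fuel' q2 scenarios'
        else pvLoopA bi ml tc fuel' rest scenarios'
    else scenarios

def generate_risk_band_scenarios (band_indices : List Int) (max_length : Int) (total_combinations : Int) : List (List Int) :=
  match PySem.List.pyGet? band_indices 0 with
  | none => []   -- Python raises IndexError here; excluded by Pre_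
  | some b0 =>
    PySem.List.slice (pvLoopA band_indices max_length total_combinations
        total_combinations.toNat [[b0]] [])
      none (some total_combinations)

-- ===== PORT B =====
-- Source B's inner for loop over the current frontier: append each path to scenarios,
-- break once the cap is reached, otherwise collect admissible children into next_frontier.
def pvInnerB (bi : List Int) (ml tc : Int) (frontier scenarios nf : List (List Int)) :
    List (List Int) × List (List Int) :=
  match frontier with
  | [] => (scenarios, nf)
  | path :: rest =>
    let scenarios' := scenarios ++ [path]
    if tc ≤ (scenarios'.length : Int) then (scenarios', nf)   -- break
    else
      if (path.length : Int) < ml then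
        let current := path.getLast?.getD 0
        let nf1 := if 0 ≤ current + 1 ∧ current + 1 < (bi.length : Int) then
                     nf ++ [path ++ [current + 1]] else nf
        let nf2 := if 0 ≤ current - 1 ∧ current - 1 < (bi.length : Int) then
                     nf1 ++ [path ++ [current - 1]] else nf1
        pvInnerB bi ml tc rest scenarios' nf2
      else pvInnerB bi ml tc rest scenarios' nf

-- Source B's outer while loop over generations: each generation appends at least one scenario and
-- stops once scenarios.length reaches tc, so at most tc.toNat generations run; fuel is the
-- same pure totality guard as in port A (the fuel-0 branch is never reached).
def pvOuterB (bi : List Int) (ml tc : Int) (fuel : Nat) (frontier scenarios : List (List Int)) :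
    List (List Int) :=
  match frontier with
  | [] => scenarios
  | p :: rest =>
    if (scenarios.length : Int) < tc then
      match fuel with
      | 0 => scenarios   -- unreachable under the fuel invariant
      | fuel' + 1 =>
        let r := pvInnerB bi ml tc (p :: rest) scenarios []
        pvOuterB bi ml tc fuel' r.2 r.1
    else scenarios

def generate_risk_band_scenarios_alt (band_indices : List Int) (max_length : Int) (total_combinations : Int) : List (List Int) :=
  match PySem.List.pyGet? band_indices 0 with
  | none => []   -- Python raises IndexError here; excluded by Pre_
  | some b0 =>
    PySem.List.slice (pvOuterB band_indices max_length total_combinations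
        total_combinations.toNat [[b0]] [])
      none (some total_combinations)

-- ===== PRECONDITION & SPEC =====
-- Python A raises IndexError when it takes the first element of an empty band_indices; nothing else raises.
def Pre_generate_risk_band_scenarios (band_indices : List Int) (max_length : Int) (total_combinations : Int) : Prop := band_indices ≠ []
instance (band_indices : List Int) (max_length : Int) (total_combinations : Int) : Decidable (Pre_generate_risk_band_scenarios band_indices max_length total_combinations) := by unfold Pre_generate_risk_band_scenarios; infer_instance
def pvWitness_generate_risk_band_scenarios : List Int × Int × Int := ([0, 1], 3, 5)

def Spec_generate_risk_band_scenarios (band_indices : List Int) (max_length : Int) (total_combinations : Int) (out : List (List Int)) : Prop := out = generate_risk_band_scenarios_alt band_indices max_length total_combinations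
instance (band_indices : List Int) (max_length : Int) (total_combinations : Int) (out : List (List Int)) : Decidable (Spec_generate_risk_band_scenarios band_indices max_length total_combinations out) := by unfold Spec_generate_risk_band_scenarios; infer_instance

-- ===== CLAIM (what is proved, stated in full; the proofs are below) =====
def Claim_equal_generate_risk_band_scenarios : Prop := ∀ (band_indices : List Int) (max_length : Int) (total_combinations : Int), Dom_generate_risk_band_scenarios band_indices max_length total_combinations → Pre_generate_risk_band_scenarios band_indices max_length total_combinations → Spec_generate_risk_band_scenarios band_indices max_length total_combinations (generate_risk_band_scenarios band_indices max_length total_combinations)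

-- ===== LEMMAS AND PROOFS =====

-- unfolding on the empty queue / frontier, for any fuel
theorem pvLoopA_nil (bi : List Int) (ml tc : Int) (fuel : Nat) (S : List (List Int)) :
    pvLoopA bi ml tc fuel [] S = S := by cases fuel <;> rfl

theorem pvOuterB_nil (bi : List Int) (ml tc : Int) (fuel : Nat) (S : List (List Int)) :
    pvOuterB bi ml tc fuel [] S = S := by cases fuel <;> rfl

-- once the cap is reached, A's loop stops regardless of queue and fuel
theorem pvLoopA_stop (bi : List Int) (ml tc : Int) (fuel : Nat) (Q S : List (List Int))
    (h : tc ≤ (S.length : Int)) : pvLoopA bi ml tc fuel Q S = S := by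
  cases Q with
  | nil => exact pvLoopA_nil bi ml tc fuel S
  | cons q Q' =>
    cases fuel <;> (simp only [pvLoopA]; rw [if_neg (by omega)])

-- the inner pass never shrinks scenarios
theorem pvInnerB_len_mono (bi : List Int) (ml tc : Int) :
    ∀ (F S nf : List (List Int)), S.length ≤ (pvInnerB bi ml tc F S nf).1.length := by
  intro F
  induction F with
  | nil => intro S nf; simp [pvInnerB]
  | cons p rest ih =>
    intro S nf
    simp only [pvInnerB]
    split
    · simp
    · split
      · exact le_trans (by simp) (ih _ _)
      · exact le_trans (by simp) (ih _ _)

-- the inner pass on a non-empty frontier strictly lengthens scenarios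
theorem pvInnerB_len_cons (bi : List Int) (ml tc : Int) (p : List Int)
    (rest S nf : List (List Int)) :
    S.length < (pvInnerB bi ml tc (p :: rest) S nf).1.length := by
  have h1 : (S ++ [p]).length ≤ (pvInnerB bi ml tc (p :: rest) S nf).1.length := by
    simp only [pvInnerB]
    split
    · simp
    · split
      · exact pvInnerB_len_mono bi ml tc _ _ _
      · exact pvInnerB_len_mono bi ml tc _ _ _
  simp only [List.length_append, List.length_cons, List.length_nil] at h1
  omega

-- Bridge: running A's flat FIFO loop on a queue split as (frontier ++ next_frontier) is the
-- same as running B's inner pass on the frontier and then A's loop on the produced frontier.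
theorem pvBridge (bi : List Int) (ml tc : Int) :
    ∀ (F S nf : List (List Int)) (fuel : Nat),
      (S.length : Int) < tc → fuel = (tc - (S.length : Int)).toNat →
      pvLoopA bi ml tc fuel (F ++ nf) S =
        pvLoopA bi ml tc (tc - ((pvInnerB bi ml tc F S nf).1.length : Int)).toNat
          (pvInnerB bi ml tc F S nf).2 (pvInnerB bi ml tc F S nf).1 := by
  intro F
  induction F with
  | nil =>
    intro S nf fuel hS hf
    simp only [List.nil_append, pvInnerB]
    rw [hf]
  | cons p rest ih =>
    intro S nf fuel hS hf
    obtain ⟨fuel', rfl⟩ : ∃ k, fuel = k + 1 := ⟨fuel - 1, by omega⟩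
    simp only [List.cons_append, pvLoopA, pvInnerB, if_pos hS]
    by_cases hbrk : tc ≤ ((S ++ [p]).length : Int)
    · rw [if_pos hbrk]
      have h2 : (tc - ((S ++ [p]).length : Int)).toNat = 0 := by omega
      split <;> rw [pvLoopA_stop bi ml tc _ _ _ hbrk, h2,
                    pvLoopA_stop bi ml tc _ _ _ hbrk]
    · rw [if_neg hbrk]
      have hS' : ((S ++ [p]).length : Int) < tc := by omega
      have hf' : fuel' = (tc - ((S ++ [p]).length : Int)).toNat := by
        simp only [List.length_append, List.length_cons, List.length_nil] at *
        push_cast at *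
        omega
      split
      · split_ifs <;> (try simp only [List.append_assoc]) <;> exact ih _ _ _ hS' hf'
      · exact ih _ _ _ hS' hf'

-- Main: A's FIFO loop equals B's level-order loop (induction on B's fuel).
theorem pvAeqB (bi : List Int) (ml tc : Int) :
    ∀ (n fuelA : Nat) (F S : List (List Int)),
      fuelA = (tc - (S.length : Int)).toNat → (tc - (S.length : Int)).toNat ≤ n →
      pvLoopA bi ml tc fuelA F S = pvOuterB bi ml tc n F S := by
  intro n
  induction n with
  | zero =>
    intro fuelA F S hf hn
    have hS : tc ≤ (S.length : Int) := by omega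
    cases F with
    | nil => rw [pvLoopA_nil, pvOuterB_nil]
    | cons p rest =>
      rw [pvLoopA_stop bi ml tc _ _ _ hS]
      simp only [pvOuterB]
      rw [if_neg (by omega)]
  | succ n ih =>
    intro fuelA F S hf hn
    cases F with
    | nil => rw [pvLoopA_nil, pvOuterB_nil]
    | cons p rest =>
      by_cases hS : (S.length : Int) < tc
      · have hb := pvBridge bi ml tc (p :: rest) S [] fuelA hS hf
        rw [List.append_nil] at hb
        rw [hb]
        have hlen := pvInnerB_len_cons bi ml tc p rest S []
        rw [ih _ _ _ rfl (by omega)]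
        conv_rhs => rw [pvOuterB]
        rw [if_pos hS]
      · rw [pvLoopA_stop bi ml tc _ _ _ (by omega)]
        simp only [pvOuterB]
        rw [if_neg (by omega)]

-- ===== VERDICT (by name: the statement is the Claim_ definition above) =====
theorem generate_risk_band_scenarios_spec : Claim_equal_generate_risk_band_scenarios := by
  intro bi ml tc _ hpre
  unfold Spec_generate_risk_band_scenarios
  cases bi with
  | nil => exact absurd rfl hpre
  | cons b bs =>
    simp only [generate_risk_band_scenarios, generate_risk_band_scenarios_alt]
    have h0 : PySem.List.pyGet? (b :: bs) (0 : Int) = some b := by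
      simp [PySem.List.pyGet?, PySem.List.pyIdx?]
    rw [h0]
    show PySem.List.slice (pvLoopA (b :: bs) ml tc tc.toNat [[b]] []) none (some tc) =
         PySem.List.slice (pvOuterB (b :: bs) ml tc tc.toNat [[b]] []) none (some tc)
    rw [pvAeqB (b :: bs) ml tc tc.toNat tc.toNat [[b]] [] (by simp) (by simp)]
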